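-- pv_equiv track=rewrite | github.com/Dpereira88/Tool-Launcher | ToolLauncer.py | to_nested
-- ===== SOURCE A (Python) =====
-- from typing import Dict, List, Optional, Any, Tuple
--
-- def to_nested(data_list: List[Dict[str, str]]) -> Dict[str, Dict[str, List[Dict[str, str]]]]:
--     """
--     Convert a flat list of items to nested dictionary format.
--
--     Args:
--         data_list: A list of item dictionaries with category and type keys
--
--     Returns:
--         A nested dictionary grouped by category and type
--     """
--     grouped: Dict[str, Dict[str, List[Dict[str, str]]]] = {}
--     filtered_data = [item for item in data_list if item]
--     for item in filtered_data:
--         category = item.get('category', 'Uncategorized').lower()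
--         item_type = item.get('type', '').lower()
--         if category not in grouped:
--             grouped[category] = {}
--         if item_type not in grouped[category]:
--             grouped[category][item_type] = []
--         grouped[category][item_type].append(item)
--     return grouped
-- ===== SOURCE B (Python) =====
-- def to_nested(data_list):
--     """Group items by (category, type) via two declarative passes:
--     first-appearance key lists via dict.fromkeys, then filter comprehensions."""
--     items = [it for it in data_list if it]
--     key = lambda it: (it.get('category', 'Uncategorized').lower(),
--                       it.get('type', '').lower())
--     keys = [key(it) for it in items]
--     cats = list(dict.fromkeys(c for c, _ in keys))
--     return {c: {t: [it for it, k in zip(items, keys) if k == (c, t)]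
--                 for t in dict.fromkeys(t2 for c2, t2 in keys if c2 == c)}
--             for c in cats}
-- ===== Notes on version B (the rewrite author's own statement) =====
-- stated objective: alternative
-- what changed: Replaces A's single imperative fold that mutates a nested dict per item with a declarative two-pass construction: compute each item's (category,type) key once, take the first-appearance key lists via dict.fromkeys, then build the nested dict with comprehensions that filter the item list per key pair.
import Mathlib
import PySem

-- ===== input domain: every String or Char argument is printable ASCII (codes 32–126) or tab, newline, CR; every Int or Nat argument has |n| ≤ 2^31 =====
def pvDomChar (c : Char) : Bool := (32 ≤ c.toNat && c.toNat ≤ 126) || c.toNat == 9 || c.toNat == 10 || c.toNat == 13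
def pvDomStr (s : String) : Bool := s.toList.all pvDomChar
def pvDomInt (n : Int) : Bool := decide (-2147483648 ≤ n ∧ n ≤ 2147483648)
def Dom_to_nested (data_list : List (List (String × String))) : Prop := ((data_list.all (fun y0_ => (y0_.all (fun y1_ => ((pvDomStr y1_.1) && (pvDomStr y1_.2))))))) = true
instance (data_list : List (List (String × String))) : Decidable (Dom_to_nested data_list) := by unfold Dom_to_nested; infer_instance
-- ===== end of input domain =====

-- B replaces A's imperative fold mutating a nested dict with a declarative two-pass
-- construction (first-appearance key lists + filter comprehensions); objective: alternative.

-- ===== PORT A =====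
-- item.get(k, dflt) on an association-list dict (first match)
def pyGetStr (it : List (String × String)) (k dflt : String) : String :=
  (PySem.Dict.mk it).getD k dflt

-- body of A's for-loop over `filtered_data`
def to_nested_step (grouped : PySem.Dict String (PySem.Dict String (List (List (String × String)))))
    (item : List (String × String)) :
    PySem.Dict String (PySem.Dict String (List (List (String × String)))) :=
  let category := PySem.Str.lower (pyGetStr item "category" "Uncategorized")
  let item_type := PySem.Str.lower (pyGetStr item "type" "")
  let g1 := if grouped.contains category then grouped else grouped.insert category PySem.Dict.empty
  let inner1 := g1.getD category PySem.Dict.empty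
  let g2 := if inner1.contains item_type then g1 else g1.insert category (inner1.insert item_type [])
  let inner2 := g2.getD category PySem.Dict.empty
  g2.insert category (inner2.insert item_type (inner2.getD item_type [] ++ [item]))

def to_nested (data_list : List (List (String × String))) : List (String × List (String × List (List (String × String)))) :=
  let filtered_data := data_list.filter (fun item => !item.isEmpty)
  let grouped := filtered_data.foldl to_nested_step PySem.Dict.empty
  grouped.items.map (fun p => (p.1, p.2.items))

-- ===== PORT B =====
-- B's key lambda
def keyOf (it : List (String × String)) : String × String :=
  (PySem.Str.lower (pyGetStr it "category" "Uncategorized"),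
   PySem.Str.lower (pyGetStr it "type" ""))

def to_nested_alt (data_list : List (List (String × String))) : List (String × List (String × List (List (String × String)))) :=
  let items := data_list.filter (fun it => !it.isEmpty)
  let keys := items.map keyOf
  let cats := PySem.List.dedup (keys.map (·.1))
  cats.map (fun c =>
    (c, (PySem.List.dedup ((keys.filter (fun k => k.1 == c)).map (·.2))).map (fun t =>
          (t, ((items.zip keys).filter (fun p => p.2 == (c, t))).map (·.1)))))

-- ===== PRECONDITION & SPEC =====
def Spec_to_nested (data_list : List (List (String × String))) (out : List (String × List (String × List (List (String × String))))) : Prop := out = to_nested_alt data_list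
instance (data_list : List (List (String × String))) (out : List (String × List (String × List (List (String × String))))) : Decidable (Spec_to_nested data_list out) := by
  unfold Spec_to_nested
  have h : DecidableEq (List (String × List (List (String × String)))) := by infer_instance
  exact @List.hasDecEq _ (@instDecidableEqProd _ _ _ h) out (to_nested_alt data_list)

-- ===== CLAIM (what is proved, stated in full; the proofs are below) =====
def Claim_equal_to_nested : Prop := ∀ (data_list : List (List (String × String))), Dom_to_nested data_list → Spec_to_nested data_list (to_nested data_list)

-- ===== LEMMAS AND PROOFS =====

-- category / type of an item, as A computes them
def catOf (it : List (String × String)) : String := (keyOf it).1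
def typOf (it : List (String × String)) : String := (keyOf it).2

-- the inner dict A builds for the items of one category
def innerD (m : List (List (String × String))) : PySem.Dict String (List (List (String × String))) :=
  PySem.Dict.mk ((PySem.List.dedup (m.map typOf)).map
    (fun t => (t, m.filter (fun it => typOf it == t))))

-- the outer dict A builds
def outerD (l : List (List (String × String))) : PySem.Dict String (PySem.Dict String (List (List (String × String)))) :=
  PySem.Dict.mk ((PySem.List.dedup (l.map catOf)).map
    (fun c => (c, innerD (l.filter (fun it => catOf it == c)))))

theorem dedup_snoc {α : Type} [BEq α] [LawfulBEq α] (xs : List α) (x : α) :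
    PySem.List.dedup (xs ++ [x]) = if x ∈ xs then PySem.List.dedup xs else PySem.List.dedup xs ++ [x] := by
  simp only [PySem.List.dedup_eq_ofList, PySem.Set.ofList_append_singleton,
    PySem.Set.add_eq_ite, PySem.Set.mem_ofList]

theorem step_normal (g : PySem.Dict String (PySem.Dict String (List (List (String × String)))))
    (x : List (String × String)) :
    to_nested_step g x =
      g.insert (catOf x) ((g.getD (catOf x) PySem.Dict.empty).insert (typOf x)
        ((g.getD (catOf x) PySem.Dict.empty).getD (typOf x) [] ++ [x])) := by
  
  have hcat : PySem.Str.lower (pyGetStr x "category" "Uncategorized") = catOf x := rfl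
  have htyp : PySem.Str.lower (pyGetStr x "type" "") = typOf x := rfl
  simp only [to_nested_step, hcat, htyp]
  by_cases hg : g.contains (catOf x) = true
  · simp only [hg, if_true]
    by_cases hti : (g.getD (catOf x) PySem.Dict.empty).contains (typOf x) = true
    · simp only [hti, if_true]
    · have hti' : (g.getD (catOf x) PySem.Dict.empty).contains (typOf x) = false := by
        simpa using hti
      simp only [hti', Bool.false_eq_true, if_false,
        PySem.Dict.getD_insert_self, PySem.Dict.insert_insert_self,
        PySem.Dict.getD_of_not_contains _ _ hti', List.nil_append]
  · have hg' : g.contains (catOf x) = false := by simpa using hg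
    simp only [hg', Bool.false_eq_true, if_false,
      PySem.Dict.getD_insert_self, PySem.Dict.contains_empty, if_false,
      PySem.Dict.insert_insert_self,
      PySem.Dict.getD_of_not_contains _ _ hg',
      PySem.Dict.getD_empty, List.nil_append]

theorem keys_innerD (m : List (List (String × String))) :
    (innerD m).keys = PySem.List.dedup (m.map typOf) := by
  
  simp [innerD, PySem.Dict.keys, List.map_map, Function.comp_def]

theorem getD_innerD {m : List (List (String × String))} {t : String} (ht : t ∈ m.map typOf) :
    (innerD m).getD t ([] : List (List (String × String))) = m.filter (fun it => typOf it == t) := by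
  
  have hnd : (innerD m).keys.Nodup := by
    rw [keys_innerD]; exact PySem.List.nodup_dedup _
  have hmem : (t, m.filter (fun it => typOf it == t)) ∈ (innerD m).items := by
    simp only [innerD]
    exact List.mem_map_of_mem ((PySem.List.mem_dedup _ _).mpr ht)
  exact PySem.Dict.getD_of_mem_items _ hmem hnd _

theorem innerD_snoc (m : List (List (String × String))) (x : List (String × String)) :
    innerD (m ++ [x]) = (innerD m).insert (typOf x) ((innerD m).getD (typOf x) [] ++ [x]) := by
  
  apply PySem.Dict.ext
  have hmapx : (m ++ [x]).map typOf = m.map typOf ++ [typOf x] := by simp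
  by_cases ht : typOf x ∈ m.map typOf
  · have hc : (innerD m).contains (typOf x) = true := by
      rw [PySem.Dict.contains_iff_mem_keys, keys_innerD]
      exact (PySem.List.mem_dedup _ _).mpr ht
    rw [PySem.Dict.items_insert, if_pos hc, getD_innerD ht]
    conv_lhs => rw [innerD, hmapx, dedup_snoc, if_pos ht]
    simp only [innerD, List.map_map]
    apply List.map_congr_left
    intro t' _
    simp only [Function.comp_apply]
    by_cases h : t' = typOf x
    · subst h
      simp [List.filter_append]
    · have h1 : (t' == typOf x) = false := by simp [h]
      have h2 : (typOf x == t') = false := by simp [Ne.symm h]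
      simp [List.filter_append, h1, h2]
  · have hc : (innerD m).contains (typOf x) = false := by
      have : ¬ typOf x ∈ (innerD m).keys := by
        rw [keys_innerD]; simpa [PySem.List.mem_dedup _ _] using ht
      cases hcc : (innerD m).contains (typOf x)
      · rfl
      · exact absurd ((PySem.Dict.contains_iff_mem_keys _ _).mp hcc) this
    rw [PySem.Dict.items_insert, if_neg (by simp [hc]),
      PySem.Dict.getD_of_not_contains _ _ hc]
    conv_lhs => rw [innerD, hmapx, dedup_snoc, if_neg ht]
    simp only [List.map_append, List.map_cons, List.map_nil]
    have hfilter : m.filter (fun it => typOf it == typOf x) = [] := by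
      rw [List.filter_eq_nil_iff]
      intro it hit
      simp only [beq_iff_eq]
      intro h
      exact ht (h ▸ List.mem_map_of_mem hit)
    congr 1
    · simp only [innerD]
      apply List.map_congr_left
      intro t' ht'
      have ht'm : t' ∈ m.map typOf := (PySem.List.mem_dedup _ _).mp ht'
      have h2 : (typOf x == t') = false := by
        simp only [beq_eq_false_iff_ne, ne_eq]
        intro h; exact ht (h ▸ ht'm)
      simp [List.filter_append, h2]
    · simp [List.filter_append, hfilter]

theorem keys_outerD (l : List (List (String × String))) :
    (outerD l).keys = PySem.List.dedup (l.map catOf) := by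
  
  simp [outerD, PySem.Dict.keys, List.map_map, Function.comp_def]

theorem getD_outerD {l : List (List (String × String))} {c : String} (hc : c ∈ l.map catOf) :
    (outerD l).getD c PySem.Dict.empty = innerD (l.filter (fun it => catOf it == c)) := by
  
  have hnd : (outerD l).keys.Nodup := by
    rw [keys_outerD]; exact PySem.List.nodup_dedup _
  have hmem : (c, innerD (l.filter (fun it => catOf it == c))) ∈ (outerD l).items := by
    simp only [outerD]
    exact List.mem_map_of_mem ((PySem.List.mem_dedup _ _).mpr hc)
  exact PySem.Dict.getD_of_mem_items _ hmem hnd _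

theorem outerD_snoc (l : List (List (String × String))) (x : List (String × String)) :
    outerD (l ++ [x]) =
      (outerD l).insert (catOf x) (((outerD l).getD (catOf x) PySem.Dict.empty).insert (typOf x)
        (((outerD l).getD (catOf x) PySem.Dict.empty).getD (typOf x) [] ++ [x])) := by
  
  apply PySem.Dict.ext
  have hmapx : (l ++ [x]).map catOf = l.map catOf ++ [catOf x] := by simp
  by_cases hc : catOf x ∈ l.map catOf
  · have hcc : (outerD l).contains (catOf x) = true := by
      rw [PySem.Dict.contains_iff_mem_keys, keys_outerD]
      exact (PySem.List.mem_dedup _ _).mpr hc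
    rw [PySem.Dict.items_insert, if_pos hcc, getD_outerD hc]
    conv_lhs => rw [outerD, hmapx, dedup_snoc, if_pos hc]
    simp only [outerD, List.map_map]
    apply List.map_congr_left
    intro c' _
    simp only [Function.comp_apply]
    by_cases h : c' = catOf x
    · subst h
      simp only [beq_self_eq_true, if_true]
      rw [List.filter_append]
      simp only [List.filter_cons, beq_self_eq_true, if_true, List.filter_nil]
      rw [innerD_snoc]
    · have h1 : (c' == catOf x) = false := by simp [h]
      have h2 : (catOf x == c') = false := by simp [Ne.symm h]
      simp [List.filter_append, h1, h2]
  · have hcc : (outerD l).contains (catOf x) = false := by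
      have : ¬ catOf x ∈ (outerD l).keys := by
        rw [keys_outerD]; simpa [PySem.List.mem_dedup _ _] using hc
      cases hk : (outerD l).contains (catOf x)
      · rfl
      · exact absurd ((PySem.Dict.contains_iff_mem_keys _ _).mp hk) this
    rw [PySem.Dict.items_insert, if_neg (by simp [hcc]),
      PySem.Dict.getD_of_not_contains _ _ hcc]
    conv_lhs => rw [outerD, hmapx, dedup_snoc, if_neg hc]
    simp only [List.map_append, List.map_cons, List.map_nil]
    have hfilter : l.filter (fun it => catOf it == catOf x) = [] := by
      rw [List.filter_eq_nil_iff]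
      intro it hit
      simp only [beq_iff_eq]
      intro h
      exact hc (h ▸ List.mem_map_of_mem hit)
    congr 1
    · simp only [outerD]
      apply List.map_congr_left
      intro c' hc'
      have hc'm : c' ∈ l.map catOf := (PySem.List.mem_dedup _ _).mp hc'
      have h2 : (catOf x == c') = false := by
        simp only [beq_eq_false_iff_ne, ne_eq]
        intro h; exact hc (h ▸ hc'm)
      simp [List.filter_append, h2]
    · rw [List.filter_append, hfilter]
      simp only [List.nil_append, List.filter_cons, beq_self_eq_true, if_true, List.filter_nil]
      have hx : innerD [x] = PySem.Dict.empty.insert (typOf x) (PySem.Dict.empty.getD (typOf x) [] ++ [x]) := by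
        apply PySem.Dict.ext
        rw [PySem.Dict.items_insert, if_neg (by simp [PySem.Dict.contains_empty])]
        simp [innerD, PySem.Set.ofList_cons, PySem.Set.ofList_nil,
          PySem.Set.discard, PySem.Dict.empty, PySem.Dict.getD, PySem.Dict.get?]
      rw [hx]

theorem fold_eq_outerD (l : List (List (String × String))) :
    l.foldl to_nested_step PySem.Dict.empty = outerD l := by
  induction l using List.reverseRecOn with
  | nil => rfl
  | append_singleton l x ih =>
      rw [List.foldl_append, List.foldl_cons, List.foldl_nil, ih, step_normal, outerD_snoc]

theorem zip_map_filter {α κ : Type} (F : List α) (f : α → κ) (P : κ → Bool) :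
    (((F.zip (F.map f)).filter (fun p => P p.2)).map (·.1)) = F.filter (fun a => P (f a)) := by
  
  induction F with
  | nil => rfl
  | cons a F ih =>
      simp only [List.map_cons, List.zip_cons_cons, List.filter_cons]
      by_cases h : P (f a) = true
      · simp [h, ih]
      · simp [h, ih]

theorem cats_eq (F : List (List (String × String))) :
    List.map ((fun x : String × String => x.1) ∘ keyOf) F = F.map catOf := rfl

theorem inner_keys_eq (F : List (List (String × String))) (c : String) :
    ((F.map keyOf).filter (fun k => k.1 == c)).map (·.2)
      = (F.filter (fun it => catOf it == c)).map typOf := by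
  rw [List.filter_map, List.map_map]; rfl

theorem key_beq (a : List (String × String)) (c t : String) :
    (keyOf a == (c, t)) = ((catOf a == c) && (typOf a == t)) := by
  cases hk : keyOf a with
  | mk a1 a2 =>
      simp only [catOf, typOf, hk]
      rfl

theorem group_eq (F : List (List (String × String))) (c t : String) :
    ((F.zip (F.map keyOf)).filter (fun p => p.2 == (c, t))).map (·.1)
      = (F.filter (fun it => catOf it == c)).filter (fun it => typOf it == t) := by
  rw [zip_map_filter F keyOf (fun k => k == (c, t)), List.filter_filter]
  apply List.filter_congr
  intro a _
  rw [key_beq]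
  exact (Bool.and_comm _ _)

-- ===== VERDICT (by name: the statement is the Claim_ definition above) =====
theorem to_nested_spec : Claim_equal_to_nested := by
  intro data_list _
  show to_nested data_list = to_nested_alt data_list
  simp only [to_nested, to_nested_alt]
  rw [fold_eq_outerD]
  simp only [outerD, List.map_map]
  rw [cats_eq]
  apply List.map_congr_left
  intro c _
  simp only [Function.comp_apply]
  congr 1
  rw [inner_keys_eq]
  simp only [innerD]
  apply List.map_congr_left
  intro t _
  congr 1
  exact (group_eq _ c t).symm
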